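-- pv_equiv track=rewrite | github.com/zseen/hackerrank-challenges | DayOfTheProgrammer.py | solve
-- ===== SOURCE A (Python) =====
-- def isYearLeapYear(year):
--     if year > 1918:
--         if year % 400 == 0 or (year % 4 == 0 and year % 100 != 0):
--             return True
--     elif year <1918:
--         if year % 4 == 0:
--             return True
--     return False
--
-- def monthsIfLeap():
--     monthsIfLeapYear = [("January",31), ("February", 29), ("March", 31), ("April", 30), ("May", 31), ("June", 30), ("July", 31),
--     ("August", 31), ("September", 30), ("October", 31), ("November", 30), ("December", 31)]
--     return monthsIfLeapYear
--
-- def monthsIfNotLeap():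
--     monthsIfNotLeapYear = [("January",31), ("February", 28), ("March", 31), ("April", 30), ("May", 31), ("June", 30), ("July", 31),
--     ("August", 31), ("September", 30), ("October", 31), ("November", 30), ("December", 31)]
--     return monthsIfNotLeapYear
--
-- def solve(year):
--     lp = monthsIfLeap()
--     nlp = monthsIfNotLeap()
--     monthsAsNumbers = ["01", "02", "03", "04", "05", "06", "07", "08", "09", "10", "11", "12"]
--
--     if year == 1918:
--         sumOfDays = -13
--         for item in range(0,len(nlp)):
--             if sumOfDays + nlp[item][1] >= 256:
--                 x = [256 - sumOfDays, nlp[item][0]]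
--                 monthNum = monthsAsNumbers[item]
--                 return str(x[0]) + "." + str(monthNum) + "." + str(year)
--             sumOfDays += nlp[item][1]
--
--     sumOfDays = 0
--     if isYearLeapYear(year) is True:
--         for item in range(0,len(lp)):
--             if sumOfDays + lp[item][1] >= 256:
--                 x = [256 - sumOfDays, lp[item][0]]
--                 monthNum = monthsAsNumbers[item]
--                 return str(x[0]) + "." + str(monthNum) + "." + str(year)
--             sumOfDays += lp[item][1]
--     else:
--         for item in range(0,len(nlp)):
--             if sumOfDays + nlp[item][1] >= 256:
--                 x = [256 - sumOfDays, nlp[item][0]]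
--                 monthNum = monthsAsNumbers[item]
--                 return str(x[0]) + "." + str(monthNum) + "." + str(year)
--             sumOfDays += nlp[item][1]
-- ===== SOURCE B (Python) =====
-- def solve(year):
--     # The sought day always falls in September; only the day-of-month varies.
--     if year == 1918:
--         day = 26
--     else:
--         if year > 1918:
--             leap = year % 400 == 0 or (year % 4 == 0 and year % 100 != 0)
--         else:
--             leap = year % 4 == 0
--         day = 12 if leap else 13
--     return str(day) + ".09." + str(year)
-- ===== Notes on version B (the rewrite author's own statement) =====
-- stated objective: simpler
-- what changed: Replaces the month-table accumulation loops with the closed-form fact that the programmer's day always falls in September, selecting the day-of-month (26/12/13) directly from the leap rule.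
import Mathlib
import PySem

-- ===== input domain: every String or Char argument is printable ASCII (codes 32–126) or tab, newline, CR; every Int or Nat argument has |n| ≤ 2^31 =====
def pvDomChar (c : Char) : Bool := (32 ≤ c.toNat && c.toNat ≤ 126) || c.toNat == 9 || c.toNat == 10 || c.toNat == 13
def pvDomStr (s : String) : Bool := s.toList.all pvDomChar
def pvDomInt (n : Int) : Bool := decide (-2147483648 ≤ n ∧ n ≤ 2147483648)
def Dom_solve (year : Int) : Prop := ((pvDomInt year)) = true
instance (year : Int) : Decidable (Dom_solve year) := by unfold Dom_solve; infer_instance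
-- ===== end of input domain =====

-- ===== PORT A =====
-- B drops A's month-accumulation loops for the closed-form 'the sought day is in September' rule (objective: simpler).
def isYearLeapYear (year : Int) : Bool :=
  if year > 1918 then
    if PySem.Int.mod year 400 == 0 || (PySem.Int.mod year 4 == 0 && PySem.Int.mod year 100 != 0) then true else false
  else if year < 1918 then
    if PySem.Int.mod year 4 == 0 then true else false
  else false

def monthsIfLeap : List (String × Int) :=
  [("January",31), ("February", 29), ("March", 31), ("April", 30), ("May", 31), ("June", 30), ("July", 31),
   ("August", 31), ("September", 30), ("October", 31), ("November", 30), ("December", 31)]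

def monthsIfNotLeap : List (String × Int) :=
  [("January",31), ("February", 28), ("March", 31), ("April", 30), ("May", 31), ("June", 30), ("July", 31),
   ("August", 31), ("September", 30), ("October", 31), ("November", 30), ("December", 31)]

-- the index loop over the month table, paired with the month-number strings (returns "" if exhausted; never happens)
def solveLoop (year : Int) (sumOfDays : Int) : List ((String × Int) × String) → String
  | [] => ""
  | ((_, days), monthNum) :: rest =>
      if sumOfDays + days ≥ 256 then
        PySem.Int.toStr (256 - sumOfDays) ++ "." ++ monthNum ++ "." ++ PySem.Int.toStr year
      else solveLoop year (sumOfDays + days) rest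

def monthsAsNumbers : List String := ["01", "02", "03", "04", "05", "06", "07", "08", "09", "10", "11", "12"]

def solve (year : Int) : String :=
  if year = 1918 then
    solveLoop year (-13) (monthsIfNotLeap.zip monthsAsNumbers)
  else if isYearLeapYear year = true then
    solveLoop year 0 (monthsIfLeap.zip monthsAsNumbers)
  else
    solveLoop year 0 (monthsIfNotLeap.zip monthsAsNumbers)

-- ===== PORT B =====
def solve_alt (year : Int) : String :=
  let day : Int :=
    if year = 1918 then 26
    else
      let leap : Bool :=
        if year > 1918 then
          PySem.Int.mod year 400 == 0 || (PySem.Int.mod year 4 == 0 && PySem.Int.mod year 100 != 0)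
        else PySem.Int.mod year 4 == 0
      if leap then 12 else 13
  PySem.Int.toStr day ++ ".09." ++ PySem.Int.toStr year

-- ===== PRECONDITION & SPEC =====
def Spec_solve (year : Int) (out : String) : Prop := out = solve_alt year
instance (year : Int) (out : String) : Decidable (Spec_solve year out) := by unfold Spec_solve; infer_instance

-- ===== CLAIM (what is proved, stated in full; the proofs are below) =====
def Claim_equal_solve : Prop := ∀ (year : Int), Dom_solve year → Spec_solve year (solve year)

-- ===== LEMMAS AND PROOFS =====

theorem solveLoop_notLeap (year : Int) :
    solveLoop year 0 (monthsIfNotLeap.zip monthsAsNumbers)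
      = PySem.Int.toStr 13 ++ ".09." ++ PySem.Int.toStr year := by
  simp [monthsIfNotLeap, monthsAsNumbers, solveLoop]
  decide

theorem solveLoop_leap (year : Int) :
    solveLoop year 0 (monthsIfLeap.zip monthsAsNumbers)
      = PySem.Int.toStr 12 ++ ".09." ++ PySem.Int.toStr year := by
  simp [monthsIfLeap, monthsAsNumbers, solveLoop]
  decide

theorem solveLoop_1918 (year : Int) :
    solveLoop year (-13) (monthsIfNotLeap.zip monthsAsNumbers)
      = PySem.Int.toStr 26 ++ ".09." ++ PySem.Int.toStr year := by
  simp [monthsIfNotLeap, monthsAsNumbers, solveLoop]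
  decide

-- ===== VERDICT (by name: the statement is the Claim_ definition above) =====
theorem solve_spec : Claim_equal_solve := by
  intro year _
  unfold Spec_solve solve solve_alt
  by_cases h18 : year = 1918
  · simp [h18, solveLoop_1918]
  · simp only [h18, if_false]
    by_cases hgt : year > 1918
    · simp only [isYearLeapYear, hgt, if_true]
      simp [solveLoop_leap, solveLoop_notLeap]
      split_ifs <;> rfl
    · have hlt : year < 1918 := by omega
      simp only [isYearLeapYear, hgt, hlt, if_true, if_false]
      simp [solveLoop_leap, solveLoop_notLeap]
      split_ifs <;> rfl
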